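-- pv_equiv track=rewrite | github.com/shell-nlp/langchain-api | langchain_api/rag/text_splitter.py | extract_parent_title
-- ===== SOURCE A (Python) =====
-- def extract_parent_title(title_info, sub_title, cur_level):
--     """
--     从目录信息中提取某个标题的父标题。
--
--     :param title_info: list，从 fitz.Document.get_toc() 获得的目录信息，包含 [level, title, page]。
--     :param sub_title: str，目标标题名称。
--     :param cur_level: int，目标标题级别。
--     :return: list，父标题及其级别的列表，如 [(1, "密云水库高水位运行工程安全保障方案")]。
--     """
--     parent_titles = []
--
--     # 找到目标标题的索引位置
--     target_index = None
--     for i, (level, title, page) in enumerate(title_info):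
--         if title == sub_title and level == cur_level:
--             target_index = i
--             break
--
--     # 如果没有找到目标标题，返回空列表
--     if target_index is None:
--         return parent_titles
--
--     # 从目标标题向前查找父标题
--     for i in range(target_index - 1, -1, -1):
--         level, title, _ = title_info[i]
--         if level < cur_level:
--             parent_titles.append((level, title))
--             cur_level = level  # 更新当前级别为找到的父标题级别
--
--     # 返回从最高层级到最低层级的父标题列表
--     return parent_titles[::-1]
-- ===== SOURCE B (Python) =====
-- def extract_parent_title(title_info, sub_title, cur_level):
--     """One forward pass: a monotonic stack holds the strictly-increasing-level
--     ancestor chain of the entry being visited; on the first target match the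
--     stack (bottom -> top) is exactly the parent list from root to closest parent."""
--     stack = []
--     for level, title, _ in title_info:
--         while stack and stack[-1][0] >= level:
--             stack.pop()
--         if title == sub_title and level == cur_level:
--             return list(stack)
--         stack.append((level, title))
--     return []
-- ===== Notes on version B (the rewrite author's own statement) =====
-- stated objective: alternative
-- what changed: Replaces A's find-the-target-then-backward-scan (two phases over the list, indexed access) with a single forward pass that maintains a monotonic ancestor stack and returns the stack at the first match.
import Mathlib
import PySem

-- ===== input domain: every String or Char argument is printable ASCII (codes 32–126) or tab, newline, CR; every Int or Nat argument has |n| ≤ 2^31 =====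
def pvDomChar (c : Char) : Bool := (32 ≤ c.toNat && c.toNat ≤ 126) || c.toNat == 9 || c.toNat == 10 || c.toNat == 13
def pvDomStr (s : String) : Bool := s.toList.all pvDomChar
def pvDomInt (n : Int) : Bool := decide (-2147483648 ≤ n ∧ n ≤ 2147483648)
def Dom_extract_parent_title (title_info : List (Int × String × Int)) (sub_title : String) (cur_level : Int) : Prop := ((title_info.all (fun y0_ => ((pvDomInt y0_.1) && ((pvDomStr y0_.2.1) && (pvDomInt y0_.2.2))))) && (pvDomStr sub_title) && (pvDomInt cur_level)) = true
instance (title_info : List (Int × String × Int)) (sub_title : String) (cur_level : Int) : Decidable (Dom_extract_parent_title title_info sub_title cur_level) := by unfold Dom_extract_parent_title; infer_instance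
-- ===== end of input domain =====

-- B replaces A's find-then-backward-scan with one forward pass keeping a monotonic
-- ancestor stack (objective: alternative, same O(n) cost, single pass, no indexing).

-- ===== PORT A =====
-- A's first loop: for i, (level, title, page) in enumerate(...): if match: target_index = i; break
def pvFindTarget (ti : List (Int × String × Int)) (sub_title : String) (cur_level : Int) (i : Int) : Option Int :=
  match ti with
  | [] => none
  | (level, title, _) :: rest =>
      if title == sub_title && level == cur_level then some i
      else pvFindTarget rest sub_title cur_level (i + 1)

def extract_parent_title (title_info : List (Int × String × Int)) (sub_title : String) (cur_level : Int) : List (Int × String) :=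
  let parent_titles : List (Int × String) := []
  match pvFindTarget title_info sub_title cur_level 0 with
  | none => parent_titles
  | some target_index =>
      -- for i in range(target_index - 1, -1, -1): level, title, _ = title_info[i]; ...
      let r := (PySem.List.pyRange (target_index - 1) (-1) (-1)).foldl
        (fun (s : List (Int × String) × Int) i =>
          match PySem.List.pyGet? title_info i with
          | some (level, title, _) => if level < s.2 then (s.1 ++ [(level, title)], level) else s
          | none => s)  -- unreachable: every generated index is in range
        (parent_titles, cur_level)
      (PySem.List.slice? r.1 none none (-1)).getD []   -- parent_titles[::-1]

-- ===== PORT B =====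
-- while stack and stack[-1][0] >= level: stack.pop()
def pvPopGE (stack : List (Int × String)) (level : Int) : List (Int × String) :=
  match h : stack.getLast? with
  | some e => if level ≤ e.1 then pvPopGE stack.dropLast level else stack
  | none => stack
termination_by stack.length
decreasing_by
  have hne : stack ≠ [] := by intro hn; subst hn; simp at h
  have : 0 < stack.length := List.length_pos_iff.mpr hne
  simp [List.length_dropLast]; omega

def pvBLoop (ti : List (Int × String × Int)) (sub_title : String) (cur_level : Int) (stack : List (Int × String)) : List (Int × String) :=
  match ti with
  | [] => []
  | (level, title, _) :: rest =>
      let stack' := pvPopGE stack level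
      if title == sub_title && level == cur_level then stack'
      else pvBLoop rest sub_title cur_level (stack' ++ [(level, title)])

def extract_parent_title_alt (title_info : List (Int × String × Int)) (sub_title : String) (cur_level : Int) : List (Int × String) :=
  pvBLoop title_info sub_title cur_level []

-- ===== PRECONDITION & SPEC =====
def Spec_extract_parent_title (title_info : List (Int × String × Int)) (sub_title : String) (cur_level : Int) (out : List (Int × String)) : Prop := out = extract_parent_title_alt title_info sub_title cur_level
instance (title_info : List (Int × String × Int)) (sub_title : String) (cur_level : Int) (out : List (Int × String)) : Decidable (Spec_extract_parent_title title_info sub_title cur_level out) := by unfold Spec_extract_parent_title; infer_instance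

-- ===== CLAIM (what is proved, stated in full; the proofs are below) =====
def Claim_equal_extract_parent_title : Prop := ∀ (title_info : List (Int × String × Int)) (sub_title : String) (cur_level : Int), Dom_extract_parent_title title_info sub_title cur_level → Spec_extract_parent_title title_info sub_title cur_level (extract_parent_title title_info sub_title cur_level)

-- ===== LEMMAS AND PROOFS =====

-- A's backward scan, phrased structurally on the reversed prefix.
def pvBack (q : List (Int × String × Int)) (l : Int) : List (Int × String) :=
  match q with
  | [] => []
  | e :: r => if e.1 < l then (e.1, e.2.1) :: pvBack r e.1 else pvBack r l

-- the full ancestor chain of the reversed prefix (no level bound)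
def pvChain : List (Int × String × Int) → List (Int × String)
  | [] => []
  | e :: r => (e.1, e.2.1) :: pvBack r e.1

-- common reference recursion
def pvRef (ti : List (Int × String × Int)) (sub_title : String) (cur_level : Int) (p : List (Int × String × Int)) : List (Int × String) :=
  match ti with
  | [] => []
  | e :: rest =>
      if e.2.1 == sub_title && e.1 == cur_level then (pvBack p.reverse cur_level).reverse
      else pvRef rest sub_title cur_level (p ++ [e])

theorem pvBack_dropWhile (q : List (Int × String × Int)) (l m : Int) (hlm : l ≤ m) :
    pvBack q l = (pvBack q m).dropWhile (fun x => decide (l ≤ x.1)) := by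
  induction q generalizing l m with
  | nil => simp [pvBack]
  | cons e r ih =>
    by_cases h1 : e.1 < l
    · have h2 : e.1 < m := lt_of_lt_of_le h1 hlm
      simp [pvBack, h1, h2, List.dropWhile_cons, not_le.mpr h1]
    · by_cases h2 : e.1 < m
      · simp only [pvBack, if_neg h1, if_pos h2, List.dropWhile_cons, decide_eq_true_eq]
        have hle : l ≤ e.1 := not_lt.mp h1
        rw [if_pos hle]
        exact ih l e.1 hle
      · simp only [pvBack, if_neg h1, if_neg h2]
        exact ih l m hlm

theorem pvBack_eq_dropWhile_chain (q : List (Int × String × Int)) (l : Int) :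
    pvBack q l = (pvChain q).dropWhile (fun x => decide (l ≤ x.1)) := by
  cases q with
  | nil => simp [pvBack, pvChain]
  | cons e r =>
    by_cases h : e.1 < l
    · simp [pvBack, pvChain, h, List.dropWhile_cons, not_le.mpr h]
    · have hle : l ≤ e.1 := not_lt.mp h
      simp only [pvBack, pvChain, if_neg h, List.dropWhile_cons, decide_eq_true_eq]
      rw [if_pos hle]
      exact pvBack_dropWhile r l e.1 hle

theorem pvPopGE_eq (stack : List (Int × String)) (l : Int) :
    pvPopGE stack l = ((stack.reverse).dropWhile (fun x => decide (l ≤ x.1))).reverse := by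
  induction stack using List.reverseRecOn with
  | nil => simp [pvPopGE]
  | append_singleton init e ih =>
    rw [pvPopGE]
    split
    · rename_i e' heq
      have he : e' = e := by
        rw [List.getLast?_concat] at heq
        exact (Option.some.inj heq).symm
      rw [List.dropLast_concat, he]
      by_cases h : l ≤ e.1
      · rw [if_pos h, ih]
        simp [List.dropWhile_cons, h]
      · rw [if_neg h]
        simp [List.dropWhile_cons, h]
    · rename_i heq
      rw [List.getLast?_concat] at heq
      cases heq

theorem pvBLoop_eq_ref (rest : List (Int × String × Int)) (sub_title : String) (cur_level : Int)
    (p : List (Int × String × Int)) :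
    pvBLoop rest sub_title cur_level ((pvChain p.reverse).reverse) = pvRef rest sub_title cur_level p := by
  induction rest generalizing p with
  | nil => simp [pvBLoop, pvRef]
  | cons e rest ih =>
    obtain ⟨level, title, page⟩ := e
    have hst : pvPopGE ((pvChain p.reverse).reverse) level = (pvBack p.reverse level).reverse := by
      rw [pvPopGE_eq]
      rw [List.reverse_reverse]
      rw [← pvBack_eq_dropWhile_chain]
    by_cases hm : (title == sub_title && level == cur_level) = true
    · have hlev : level = cur_level := by
        have := (Bool.and_eq_true _ _).mp hm
        exact beq_iff_eq.mp this.2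
      simp only [pvBLoop, pvRef, hm, if_pos]
      rw [hst, hlev]
    · simp only [pvBLoop, pvRef, hm]
      rw [if_neg (by simpa using hm), if_neg (by simpa using hm)]
      have hpush : pvPopGE ((pvChain p.reverse).reverse) level ++ [(level, title)]
          = (pvChain ((p ++ [(level, title, page)]).reverse)).reverse := by
        rw [hst]
        simp [pvChain, List.reverse_append]
      rw [hpush]
      exact ih (p ++ [(level, title, page)])

theorem pvFindTarget_eq (ti : List (Int × String × Int)) (sub_title : String) (cur_level : Int) (i : Int) :
    pvFindTarget ti sub_title cur_level i
      = (ti.findIdx? (fun e => e.2.1 == sub_title && e.1 == cur_level)).map (fun n => i + (n : Int)) := by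
  induction ti generalizing i with
  | nil => simp [pvFindTarget]
  | cons e rest ih =>
    obtain ⟨level, title, page⟩ := e
    by_cases h : (title == sub_title && level == cur_level) = true
    · simp [pvFindTarget, h, List.findIdx?_cons]
    · simp only [pvFindTarget, List.findIdx?_cons]
      rw [if_neg h]
      simp only [h, if_false]
      rw [ih (i + 1)]
      cases rest.findIdx? (fun e => e.2.1 == sub_title && e.1 == cur_level) with
      | none => simp
      | some n => simp; push_cast; ring

theorem pvFoldIdx (ti : List (Int × String × Int)) (n : Nat) (hn : n ≤ ti.length)
    (s : List (Int × String) × Int) :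
    (PySem.List.pyRange ((n : Int) - 1) (-1) (-1)).foldl
        (fun (s : List (Int × String) × Int) i =>
          match PySem.List.pyGet? ti i with
          | some (level, title, _) => if level < s.2 then (s.1 ++ [(level, title)], level) else s
          | none => s) s
      = ((ti.take n).reverse).foldl
          (fun (s : List (Int × String) × Int) e =>
            if e.1 < s.2 then (s.1 ++ [(e.1, e.2.1)], e.1) else s) s := by
  induction n generalizing s with
  | zero =>
    rw [PySem.List.pyRange_neg_one_eq_nil (by norm_num)]
    simp
  | succ k ih =>
    have hk : k < ti.length := by omega
    have h1 : ((k + 1 : Nat) : Int) - 1 = (k : Int) := by push_cast; ring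
    rw [h1, PySem.List.pyRange_neg_one_cons (by omega)]
    simp only [List.foldl_cons]
    have hget : PySem.List.pyGet? ti (k : Int) = some ti[k] := by
      rw [PySem.List.pyGet?_natCast]
      simp [hk]
    rw [hget]
    have htake : (ti.take (k + 1)).reverse = ti[k] :: (ti.take k).reverse := by
      rw [List.take_add_one]
      simp [List.getElem?_eq_getElem hk]
    rw [htake]
    simp only [List.foldl_cons, List.get_eq_getElem]
    exact ih (by omega) _

theorem pvFold_back (q : List (Int × String × Int)) (acc : List (Int × String)) (cur : Int) :
    (q.foldl (fun (s : List (Int × String) × Int) e =>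
        if e.1 < s.2 then (s.1 ++ [(e.1, e.2.1)], e.1) else s) (acc, cur)).1
      = acc ++ pvBack q cur := by
  induction q generalizing acc cur with
  | nil => simp [pvBack]
  | cons e r ih =>
    simp only [List.foldl_cons, pvBack]
    by_cases h : e.1 < cur <;> simp [h, ih]

theorem pvRef_eq (ti : List (Int × String × Int)) (sub_title : String) (cur_level : Int)
    (p : List (Int × String × Int)) :
    pvRef ti sub_title cur_level p
      = match ti.findIdx? (fun e => e.2.1 == sub_title && e.1 == cur_level) with
        | none => []
        | some n => (pvBack ((p ++ ti.take n).reverse) cur_level).reverse := by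
  induction ti generalizing p with
  | nil => simp [pvRef]
  | cons e rest ih =>
    by_cases h : (e.2.1 == sub_title && e.1 == cur_level) = true
    · simp [pvRef, h, List.findIdx?_cons]
    · simp only [pvRef, List.findIdx?_cons, h, Bool.false_eq_true, if_false]
      rw [ih (p ++ [e])]
      cases rest.findIdx? (fun e => e.2.1 == sub_title && e.1 == cur_level) with
      | none => simp
      | some n => simp

theorem pv_main (title_info : List (Int × String × Int)) (sub_title : String) (cur_level : Int) :
    extract_parent_title title_info sub_title cur_level
      = extract_parent_title_alt title_info sub_title cur_level := by
  have hB : extract_parent_title_alt title_info sub_title cur_level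
      = pvRef title_info sub_title cur_level [] := by
    have := pvBLoop_eq_ref title_info sub_title cur_level []
    simpa [extract_parent_title_alt, pvChain] using this
  rw [hB, pvRef_eq]
  have hft := pvFindTarget_eq title_info sub_title cur_level 0
  cases h2 : title_info.findIdx? (fun e => e.2.1 == sub_title && e.1 == cur_level) with
  | none =>
    rw [h2] at hft
    have hf0 : pvFindTarget title_info sub_title cur_level 0 = none := by rw [hft]; rfl
    simp [extract_parent_title, hf0]
  | some n =>
    rw [h2] at hft
    have hft' : pvFindTarget title_info sub_title cur_level 0 = some ((n : Nat) : Int) := by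
      rw [hft]; simp
    have hn : n < title_info.length := (List.findIdx?_eq_some_iff_findIdx_eq.mp h2).1
    simp only [extract_parent_title, hft']
    rw [pvFoldIdx title_info n (le_of_lt hn) ([], cur_level),
        PySem.List.slice?_none_none_neg_one, pvFold_back]
    simp

-- ===== VERDICT (by name: the statement is the Claim_ definition above) =====
theorem extract_parent_title_spec : Claim_equal_extract_parent_title := by
  intro title_info sub_title cur_level _
  unfold Spec_extract_parent_title
  exact pv_main title_info sub_title cur_level
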